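-- pv_equiv track=rewrite | github.com/kimjune01/june.kim | worklog/h10_deep_dive.py | all_pairs_reach
-- ===== SOURCE A (Python) =====
-- from collections import defaultdict
-- import heapq
--
-- def build_adj(k, edges):
--     adj = defaultdict(list)
--     for (a, b, t) in edges:
--         adj[a].append((b, t))
--         adj[b].append((a, t))
--     return adj
--
-- def temporal_reachable_from(source, adj):
--     best = {source: 0}
--     queue = [(0, source)]
--     heapq.heapify(queue)
--     while queue:
--         t_arr, u = heapq.heappop(queue)
--         if t_arr > best.get(u, float('inf')):
--             continue
--         for (v, t_edge) in adj[u]: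
--             if t_edge >= t_arr:
--                 if t_edge < best.get(v, float('inf')):
--                     best[v] = t_edge
--                     heapq.heappush(queue, (t_edge, v))
--     return set(best.keys())
--
-- def all_pairs_reach(k, edges):
--     adj = build_adj(k, edges)
--     n = 2 * k
--     reach = {}
--     for s in range(n):
--         r = temporal_reachable_from(s, adj)
--         for d in range(n):
--             reach[(s, d)] = d in r
--     return reach
-- ===== SOURCE B (Python) =====
-- def all_pairs_reach(k, edges):
--     # Label-correcting relaxation: sweep all edges (both directions) to a
--     # fixpoint of earliest-arrival times; no heap, no adjacency index.
--     n = 2 * k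
--     reach = {}
--     for s in range(n):
--         best = {s: 0}
--         changed = True
--         while changed:
--             changed = False
--             for (a, b, t) in edges:
--                 for (u, v) in ((a, b), (b, a)):
--                     if u in best and best[u] <= t and (v not in best or t < best[v]):
--                         best[v] = t
--                         changed = True
--         for d in range(n):
--             reach[(s, d)] = d in best
--     return reach
-- ===== Notes on version B (the rewrite author's own statement) =====
-- stated objective: simpler
-- what changed: Replaces the per-source heap-based temporal Dijkstra (adjacency index + priority queue) with a plain label-correcting relaxation: repeated sweeps over the raw edge list in both orientations until the earliest-arrival map stops changing; no heapq, no defaultdict adjacency.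
import Mathlib
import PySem

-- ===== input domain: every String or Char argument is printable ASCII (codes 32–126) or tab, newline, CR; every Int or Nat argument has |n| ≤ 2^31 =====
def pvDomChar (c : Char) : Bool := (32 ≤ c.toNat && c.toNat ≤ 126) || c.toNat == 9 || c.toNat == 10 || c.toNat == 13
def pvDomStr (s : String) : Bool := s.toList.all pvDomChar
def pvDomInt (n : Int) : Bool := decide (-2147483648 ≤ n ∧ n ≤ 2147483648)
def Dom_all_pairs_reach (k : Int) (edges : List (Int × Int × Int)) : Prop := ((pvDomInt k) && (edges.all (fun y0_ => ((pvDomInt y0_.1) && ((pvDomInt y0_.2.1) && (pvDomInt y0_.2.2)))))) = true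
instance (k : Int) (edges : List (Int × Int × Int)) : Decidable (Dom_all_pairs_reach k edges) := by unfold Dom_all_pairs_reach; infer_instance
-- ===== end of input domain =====

-- B replaces A's per-source heap-based temporal Dijkstra (defaultdict adjacency + heapq)
-- with a plain label-correcting relaxation that sweeps the raw edge list to a fixpoint;
-- objective: simpler (no heap, no adjacency index), not faster.

-- ===== PORT A =====

-- build_adj: defaultdict(list) with both orientations appended
def pvAdjStep (adj : PySem.Dict Int (List (Int × Int))) (e : Int × Int × Int) :
    PySem.Dict Int (List (Int × Int)) :=
  let adj1 := adj.insert e.1 (adj.getD e.1 [] ++ [(e.2.1, e.2.2)])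
  adj1.insert e.2.1 (adj1.getD e.2.1 [] ++ [(e.1, e.2.2)])

def pvBuildAdj (edges : List (Int × Int × Int)) : PySem.Dict Int (List (Int × Int)) :=
  edges.foldl pvAdjStep PySem.Dict.empty

-- heapq.heappop: removes and returns the smallest (t, v) tuple (Python's lexicographic
-- tuple order); ported by hand (PySem has no heap), exact on the observable behaviour
-- (the heap's internal layout is not observable, pops always yield the global minimum).
def pvLexLe (x y : Int × Int) : Bool := x.1 < y.1 || (x.1 == y.1 && x.2 ≤ y.2)

def pvPop : List (Int × Int) → Option ((Int × Int) × List (Int × Int))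
  | [] => none
  | e :: q =>
    match pvPop q with
    | none => some (e, [])
    | some (m, r) => if pvLexLe e m then some (e, q) else some (m, e :: r)

-- body of the 'for (v, t_edge) in adj[u]' relaxation loop
def pvDijkStep (tarr : Int) (st : PySem.Dict Int Int × List (Int × Int)) (p : Int × Int) :
    PySem.Dict Int Int × List (Int × Int) :=
  if tarr ≤ p.2 then
    if (match st.1.get? p.1 with | some bv => decide (p.2 < bv) | none => true) then
      (st.1.insert p.1 p.2, st.2 ++ [(p.2, p.1)])
    else st
  else st

-- the 'while queue:' loop; fuel is only a totality guard (proved sufficient below)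
def pvDijkLoop (adj : PySem.Dict Int (List (Int × Int))) :
    Nat → PySem.Dict Int Int → List (Int × Int) → PySem.Dict Int Int
  | 0, best, _ => best
  | fuel+1, best, queue =>
    match pvPop queue with
    | none => best
    | some ((tarr, u), queue') =>
      if (match best.get? u with | some bu => decide (bu < tarr) | none => false) then
        pvDijkLoop adj fuel best queue'
      else
        let st := (adj.getD u []).foldl (pvDijkStep tarr) (best, queue')
        pvDijkLoop adj fuel st.1 st.2

def pvNodes (edges : List (Int × Int × Int)) : List Int :=
  PySem.Set.ofList (edges.flatMap (fun e => [e.1, e.2.1]))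
def pvTimes (edges : List (Int × Int × Int)) : List Int :=
  PySem.Set.ofList (edges.map (fun e => e.2.2))
def pvFuel (edges : List (Int × Int × Int)) : Nat :=
  (pvNodes edges).length * (pvTimes edges).length + (pvTimes edges).length + 2

def pvTemporalReachableFrom (source : Int) (adj : PySem.Dict Int (List (Int × Int)))
    (fuel : Nat) : PySem.Set Int :=
  PySem.Set.ofList (pvDijkLoop adj fuel (PySem.Dict.empty.insert source 0) [(0, source)]).keys

def all_pairs_reach (k : Int) (edges : List (Int × Int × Int)) : List (Int × Int × Bool) :=
  let adj := pvBuildAdj edges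
  let n := 2 * k
  let reach := (PySem.List.pyRange 0 n 1).foldl (fun reach s =>
      let r := pvTemporalReachableFrom s adj (pvFuel edges)
      (PySem.List.pyRange 0 n 1).foldl (fun reach d =>
          reach.insert (s, d) (PySem.Set.contains r d)) reach)
    PySem.Dict.empty
  -- the dict's (s, d) ↦ b items rendered as the required (s, d, b) triples
  reach.items.map (fun p => (p.1.1, p.1.2, p.2))

-- ===== PORT B =====

-- one directed relaxation: if u has an arrival ≤ t and t improves v, set best[v] = t
def pvRelax (u v t : Int) (st : PySem.Dict Int Int × Bool) : PySem.Dict Int Int × Bool :=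
  if ((match st.1.get? u with | some bu => decide (bu ≤ t) | none => false)
      && (match st.1.get? v with | some bv => decide (t < bv) | none => true)) then
    (st.1.insert v t, true)
  else st

-- one 'for (a, b, t) in edges' pass, both orientations, with the changed flag
def pvSweep (edges : List (Int × Int × Int)) (best : PySem.Dict Int Int) :
    PySem.Dict Int Int × Bool :=
  edges.foldl (fun st e => pvRelax e.2.1 e.1 e.2.2 (pvRelax e.1 e.2.1 e.2.2 st)) (best, false)

-- the 'while changed:' loop; fuel is only a totality guard (proved sufficient below)
def pvBLoop (edges : List (Int × Int × Int)) : Nat → PySem.Dict Int Int → PySem.Dict Int Int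
  | 0, best => best
  | f+1, best =>
      let st := pvSweep edges best
      if st.2 then pvBLoop edges f st.1 else st.1

def all_pairs_reach_alt (k : Int) (edges : List (Int × Int × Int)) : List (Int × Int × Bool) :=
  let n := 2 * k
  let reach := (PySem.List.pyRange 0 n 1).foldl (fun reach s =>
      let best := pvBLoop edges (pvFuel edges) (PySem.Dict.empty.insert s 0)
      (PySem.List.pyRange 0 n 1).foldl (fun reach d =>
          reach.insert (s, d) (best.contains d)) reach)
    PySem.Dict.empty
  reach.items.map (fun p => (p.1.1, p.1.2, p.2))

-- ===== PRECONDITION & SPEC =====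
def Spec_all_pairs_reach (k : Int) (edges : List (Int × Int × Int)) (out : List (Int × Int × Bool)) : Prop := out = all_pairs_reach_alt k edges
instance (k : Int) (edges : List (Int × Int × Int)) (out : List (Int × Int × Bool)) : Decidable (Spec_all_pairs_reach k edges out) := by unfold Spec_all_pairs_reach; infer_instance

-- ===== CLAIM (what is proved, stated in full; the proofs are below) =====
def Claim_equal_all_pairs_reach : Prop := ∀ (k : Int) (edges : List (Int × Int × Int)), Dom_all_pairs_reach k edges → Spec_all_pairs_reach k edges (all_pairs_reach k edges)

-- ===== LEMMAS AND PROOFS =====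

-- time-respecting arrival: from s (at time 0) one can arrive at v at time t
inductive pvTArr (edges : List (Int × Int × Int)) (s : Int) : Int → Int → Prop
  | src : pvTArr edges s s 0
  | step {u t v te : Int} : pvTArr edges s u t →
      ((u, v, te) ∈ edges ∨ (v, u, te) ∈ edges) → t ≤ te → pvTArr edges s v te

-- an earliest-arrival map is "good" when its entries are genuine arrivals (sound),
-- it contains the source at a time ≤ 0, and it is stable under edge relaxation
def pvStable (edges : List (Int × Int × Int)) (best : PySem.Dict Int Int)
    (v bv : Int) : Prop :=
  ∀ w te, ((v, w, te) ∈ edges ∨ (w, v, te) ∈ edges) → bv ≤ te →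
    ∃ bw, best.get? w = some bw ∧ bw ≤ te

def pvGood (edges : List (Int × Int × Int)) (s : Int) (best : PySem.Dict Int Int) : Prop :=
  (∀ v t, best.get? v = some t → pvTArr edges s v t) ∧
  (∃ b0, best.get? s = some b0 ∧ b0 ≤ 0) ∧
  (∀ v bv, best.get? v = some bv → pvStable edges best v bv)

-- refinement: every key survives with a value that did not increase
def pvLeD (b b' : PySem.Dict Int Int) : Prop :=
  ∀ v t, b.get? v = some t → ∃ t', b'.get? v = some t' ∧ t' ≤ t

-- the termination measure: per node, how many candidate times lie strictly below
-- its current label (absent node = all of them); every improvement lowers the sum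
def pvC (T : List Int) (best : PySem.Dict Int Int) (v : Int) : Nat :=
  match best.get? v with
  | some b => (T.filter (fun t => decide (t < b))).length
  | none => T.length

def pvMu (N T : List Int) (best : PySem.Dict Int Int) : Nat := (N.map (pvC T best)).sum

theorem pvGood_keys {edges s best} (h : pvGood edges s best) (d : Int) :
    (best.get? d).isSome = true ↔ ∃ t, pvTArr edges s d t := by
  obtain ⟨h1, h2, h3⟩ := h
  constructor
  · intro hd
    obtain ⟨t, ht⟩ := Option.isSome_iff_exists.mp hd
    exact ⟨t, h1 d t ht⟩
  · rintro ⟨t, ht⟩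
    suffices hs : ∃ td, best.get? d = some td ∧ td ≤ t by
      obtain ⟨td, htd, _⟩ := hs; simp [htd]
    induction ht with
    | src => obtain ⟨b0, hb0, hle⟩ := h2; exact ⟨b0, hb0, hle⟩
    | step hu he hle ih =>
      obtain ⟨tu, htu, htule⟩ := ih
      obtain ⟨tv, htv, htvle⟩ := h3 _ tu htu _ _ he (le_trans htule hle)
      exact ⟨tv, htv, htvle⟩

theorem pvLeD_refl (b : PySem.Dict Int Int) : pvLeD b b :=
  fun _ t h => ⟨t, h, le_refl t⟩
theorem pvLeD_trans {a b c} (h1 : pvLeD a b) (h2 : pvLeD b c) : pvLeD a c := by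
  intro v t h
  obtain ⟨t1, hb, h1le⟩ := h1 v t h
  obtain ⟨t2, hc, h2le⟩ := h2 v t1 hb
  exact ⟨t2, hc, le_trans h2le h1le⟩
theorem pvStable_mono {edges b b' v bv} (h : pvLeD b b') (hs : pvStable edges b v bv) :
    pvStable edges b' v bv := by
  intro w te he hle
  obtain ⟨bw, hw, hwle⟩ := hs w te he hle
  obtain ⟨bw', hw', hle'⟩ := h w bw hw
  exact ⟨bw', hw', le_trans hle' hwle⟩

-- adjacency bridge
theorem pvAdjStep_mem (d0 : PySem.Dict Int (List (Int × Int))) (a b t x w te : Int) :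
    (w, te) ∈ (pvAdjStep d0 (a, b, t)).getD x [] ↔
      ((w, te) ∈ d0.getD x [] ∨ (x = a ∧ w = b ∧ te = t) ∨ (x = b ∧ w = a ∧ te = t)) := by
  unfold pvAdjStep
  simp only [PySem.Dict.getD_insert]
  split_ifs <;> (try subst_vars) <;>
    (try simp only [List.mem_append, List.mem_singleton, Prod.mk.injEq]) <;> tauto

theorem pvMem_adj_aux (es : List (Int × Int × Int)) (x w te : Int) :
    ∀ d0, ((w, te) ∈ (es.foldl pvAdjStep d0).getD x [] ↔
      ((w, te) ∈ d0.getD x [] ∨ (x, w, te) ∈ es ∨ (w, x, te) ∈ es)) := by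
  induction es with
  | nil => simp
  | cons e es ih =>
    obtain ⟨a, b, t⟩ := e
    intro d0
    rw [List.foldl_cons, ih (pvAdjStep d0 (a, b, t)), pvAdjStep_mem]
    simp only [List.mem_cons, Prod.mk.injEq]
    tauto

theorem pvMem_adj (edges : List (Int × Int × Int)) (x : Int) (p : Int × Int) :
    p ∈ (pvBuildAdj edges).getD x [] ↔
      ((x, p.1, p.2) ∈ edges ∨ (p.1, x, p.2) ∈ edges) := by
  obtain ⟨w, te⟩ := p
  unfold pvBuildAdj
  rw [pvMem_adj_aux edges x w te PySem.Dict.empty]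
  simp

theorem pvMem_nodes_left {edges : List (Int × Int × Int)} {a b t : Int}
    (h : (a, b, t) ∈ edges) : a ∈ pvNodes edges := by
  unfold pvNodes
  rw [PySem.Set.mem_ofList]
  exact List.mem_flatMap.mpr ⟨(a, b, t), h, by simp⟩
theorem pvMem_nodes_right {edges : List (Int × Int × Int)} {a b t : Int}
    (h : (a, b, t) ∈ edges) : b ∈ pvNodes edges := by
  unfold pvNodes
  rw [PySem.Set.mem_ofList]
  exact List.mem_flatMap.mpr ⟨(a, b, t), h, by simp⟩
theorem pvMem_times {edges : List (Int × Int × Int)} {a b t : Int}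
    (h : (a, b, t) ∈ edges) : t ∈ pvTimes edges := by
  unfold pvTimes
  rw [PySem.Set.mem_ofList]
  exact List.mem_map.mpr ⟨(a, b, t), h, rfl⟩

-- counting helpers for the measure
theorem pvCountP_lt_of_mem {α : Type} {l : List α} {x : α} {p : α → Bool}
    (hx : x ∈ l) (hp : p x = false) : (l.filter p).length < l.length := by
  rw [List.length_filter_lt_length_iff_exists]
  exact ⟨x, hx, by simp [hp]⟩

theorem pvFilter_lt_filter {T : List Int} {t b : Int} (hT : t ∈ T) (htb : t < b) :
    (T.filter (fun x => decide (x < t))).length < (T.filter (fun x => decide (x < b))).length := by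
  have hmono : ∀ (ys : List Int), (ys.filter (fun x => decide (x < t))).length ≤
      (ys.filter (fun x => decide (x < b))).length := by
    intro ys
    rw [← List.countP_eq_length_filter, ← List.countP_eq_length_filter]
    apply List.countP_mono_left
    intro x hx h
    simp only [decide_eq_true_eq] at *
    omega
  induction T with
  | nil => simp at hT
  | cons y ys ih =>
    simp only [List.filter_cons]
    by_cases h1 : y < t
    · have h2 : y < b := lt_trans h1 htb
      have ht' : t ∈ ys := by
        rcases List.mem_cons.mp hT with heq | hy
        · omega
        · exact hy
      have := ih ht'
      simp [h1, h2]
      omega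
    · by_cases h2 : y < b
      · rcases List.mem_cons.mp hT with heq | hy
        · subst heq
          have := hmono ys
          simp [h2]
          omega
        · have := ih hy
          simp [h1, h2]
          omega
      · rcases List.mem_cons.mp hT with heq | hy
        · omega
        · have := ih hy
          simp [h1, h2]
          omega

-- the measure drops when a label is (first set or) strictly improved at a node of N
theorem pvC_le (T : List Int) (best : PySem.Dict Int Int) (x : Int) :
    pvC T best x ≤ T.length := by
  unfold pvC
  cases best.get? x with
  | none => exact le_refl _
  | some b => exact List.length_filter_le _ _

theorem pvC_insert_of_ne {best : PySem.Dict Int Int} {v x : Int} (t : Int) (h : x ≠ v)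
    (T : List Int) : pvC T (best.insert v t) x = pvC T best x := by
  unfold pvC
  rw [PySem.Dict.get?_insert_of_ne best t h]

theorem pvMu_insert_lt {N T : List Int} {best : PySem.Dict Int Int} {v t : Int}
    (hv : v ∈ N) (ht : t ∈ T)
    (himp : best.get? v = none ∨ ∃ bv, best.get? v = some bv ∧ t < bv) :
    pvMu N T (best.insert v t) < pvMu N T best := by
  have hstrict : pvC T (best.insert v t) v < pvC T best v := by
    unfold pvC
    rw [PySem.Dict.get?_insert_self]
    rcases himp with hnone | ⟨bv, hbv, hlt⟩
    · rw [hnone]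
      exact pvCountP_lt_of_mem ht (by simp)
    · rw [hbv]
      exact pvFilter_lt_filter ht hlt
  unfold pvMu
  apply List.sum_lt_sum
  · intro x hx
    by_cases hxv : x = v
    · subst hxv; exact le_of_lt hstrict
    · rw [pvC_insert_of_ne t hxv]
  · exact ⟨v, hv, hstrict⟩

theorem pvMu_le_bound (N T : List Int) (best : PySem.Dict Int Int) :
    pvMu N T best ≤ N.length * T.length := by
  unfold pvMu
  have := List.sum_le_card_nsmul (N.map (pvC T best)) T.length
    (by intro x hx; obtain ⟨y, _, rfl⟩ := List.mem_map.mp hx; exact pvC_le T best y)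
  simpa [smul_eq_mul] using this

-- pvPop facts
theorem pvPop_none_iff (q : List (Int × Int)) : pvPop q = none ↔ q = [] := by
  cases q with
  | nil => simp [pvPop]
  | cons e q =>
    simp only [pvPop]
    cases h : pvPop q with
    | none => simp
    | some mr => cases mr with | mk m r => by_cases hle : pvLexLe e m <;> simp [hle]
theorem pvPop_mem {q : List (Int × Int)} {m r} (h : pvPop q = some (m, r)) : m ∈ q := by
  induction q generalizing m r with
  | nil => simp [pvPop] at h
  | cons e q ih =>
    simp only [pvPop] at h
    cases hq : pvPop q with
    | none => rw [hq] at h; simp at h; simp [h.1]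
    | some mr =>
      obtain ⟨m0, r0⟩ := mr
      rw [hq] at h
      by_cases hle : pvLexLe e m0 <;> simp [hle] at h
      · simp [h.1]
      · exact List.mem_cons_of_mem _ (h.1 ▸ ih hq)
theorem pvPop_length {q : List (Int × Int)} {m r} (h : pvPop q = some (m, r)) :
    r.length + 1 = q.length := by
  induction q generalizing m r with
  | nil => simp [pvPop] at h
  | cons e q ih =>
    simp only [pvPop] at h
    cases hq : pvPop q with
    | none =>
      rw [hq] at h
      have : q = [] := (pvPop_none_iff q).mp hq
      simp at h
      simp [← h.2, this]
    | some mr =>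
      obtain ⟨m0, r0⟩ := mr
      rw [hq] at h
      by_cases hle : pvLexLe e m0 <;> simp [hle] at h
      · simp [← h.2]
      · have := ih hq
        simp [← h.2]
        omega
theorem pvPop_mem_or {q : List (Int × Int)} {m r} (h : pvPop q = some (m, r)) :
    ∀ x ∈ q, x = m ∨ x ∈ r := by
  induction q generalizing m r with
  | nil => simp [pvPop] at h
  | cons e q ih =>
    simp only [pvPop] at h
    cases hq : pvPop q with
    | none =>
      rw [hq] at h
      have hq' : q = [] := (pvPop_none_iff q).mp hq
      simp at h
      subst hq'
      intro x hx
      simp at hx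
      simp [hx, h.1]
    | some mr =>
      obtain ⟨m0, r0⟩ := mr
      rw [hq] at h
      by_cases hle : pvLexLe e m0 <;> simp [hle] at h
      · obtain ⟨rfl, rfl⟩ := h
        intro x hx
        rcases List.mem_cons.mp hx with rfl | hx
        · exact Or.inl rfl
        · exact Or.inr hx
      · obtain ⟨rfl, rfl⟩ := h
        intro x hx
        rcases List.mem_cons.mp hx with rfl | hx
        · exact Or.inr (List.mem_cons_self ..)
        · rcases ih hq x hx with rfl | hx0
          · exact Or.inl rfl
          · exact Or.inr (List.mem_cons_of_mem _ hx0)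
theorem pvPop_sub {q : List (Int × Int)} {m r} (h : pvPop q = some (m, r)) :
    ∀ x ∈ r, x ∈ q := by
  induction q generalizing m r with
  | nil => simp [pvPop] at h
  | cons e q ih =>
    simp only [pvPop] at h
    cases hq : pvPop q with
    | none => rw [hq] at h; simp at h; obtain ⟨rfl, rfl⟩ := h; simp
    | some mr =>
      obtain ⟨m0, r0⟩ := mr
      rw [hq] at h
      by_cases hle : pvLexLe e m0 <;> simp [hle] at h
      · obtain ⟨rfl, rfl⟩ := h
        intro x hx
        exact List.mem_cons_of_mem _ hx
      · obtain ⟨rfl, rfl⟩ := h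
        intro x hx
        rcases List.mem_cons.mp hx with rfl | hx
        · exact List.mem_cons_self ..
        · exact List.mem_cons_of_mem _ (ih hq x hx)

-- ===== A-side =====

def pvInvA (edges : List (Int × Int × Int)) (s : Int)
    (best : PySem.Dict Int Int) (queue : List (Int × Int)) : Prop :=
  (∀ v t, best.get? v = some t → pvTArr edges s v t) ∧
  (∃ b0, best.get? s = some b0 ∧ b0 ≤ 0) ∧
  (∀ e ∈ queue, ∃ bv, best.get? e.2 = some bv ∧ bv ≤ e.1) ∧
  (∀ v bv, best.get? v = some bv → (bv, v) ∈ queue ∨ pvStable edges best v bv)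

-- case split for one relaxation step of A
theorem pvDijkStep_split (tarr : Int) (st : PySem.Dict Int Int × List (Int × Int))
    (p : Int × Int) :
    (¬ tarr ≤ p.2 ∧ pvDijkStep tarr st p = st) ∨
    (tarr ≤ p.2 ∧ (∃ bv, st.1.get? p.1 = some bv ∧ bv ≤ p.2) ∧ pvDijkStep tarr st p = st) ∨
    (tarr ≤ p.2 ∧ (st.1.get? p.1 = none ∨ ∃ bv, st.1.get? p.1 = some bv ∧ p.2 < bv) ∧
      pvDijkStep tarr st p = (st.1.insert p.1 p.2, st.2 ++ [(p.2, p.1)])) := by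
  by_cases h1 : tarr ≤ p.2
  · rcases hv : st.1.get? p.1 with _ | bv
    · right; right
      exact ⟨h1, Or.inl rfl, by simp [pvDijkStep, h1, hv]⟩
    · by_cases h2 : p.2 < bv
      · right; right
        exact ⟨h1, Or.inr ⟨bv, rfl, h2⟩, by simp [pvDijkStep, h1, hv, h2]⟩
      · right; left
        exact ⟨h1, ⟨bv, rfl, by omega⟩, by simp [pvDijkStep, h1, hv, h2]⟩
  · left
    exact ⟨h1, by simp [pvDijkStep, h1]⟩

-- master lemma for the relaxation fold of one popped node
theorem pvDijkFold (edges : List (Int × Int × Int)) (s tarr u : Int) (N T : List Int)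
    (L : List (Int × Int))
    (hL : ∀ p ∈ L, ((u, p.1, p.2) ∈ edges ∨ (p.1, u, p.2) ∈ edges))
    (hLN : ∀ p ∈ L, p.1 ∈ N) (hLT : ∀ p ∈ L, p.2 ∈ T)
    (hu : pvTArr edges s u tarr) :
    ∀ st : PySem.Dict Int Int × List (Int × Int),
      (∀ v t, st.1.get? v = some t → pvTArr edges s v t) →
      (∃ b0, st.1.get? s = some b0 ∧ b0 ≤ 0) →
      (∀ e ∈ st.2, ∃ bv, st.1.get? e.2 = some bv ∧ bv ≤ e.1) →
      (∀ v bv, st.1.get? v = some bv → v ≠ u → (bv, v) ∈ st.2 ∨ pvStable edges st.1 v bv) →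
      st.1.get? u = some tarr →
      (let st' := L.foldl (pvDijkStep tarr) st
       (∀ v t, st'.1.get? v = some t → pvTArr edges s v t) ∧
       (∃ b0, st'.1.get? s = some b0 ∧ b0 ≤ 0) ∧
       (∀ e ∈ st'.2, ∃ bv, st'.1.get? e.2 = some bv ∧ bv ≤ e.1) ∧
       (∀ v bv, st'.1.get? v = some bv → v ≠ u → (bv, v) ∈ st'.2 ∨ pvStable edges st'.1 v bv) ∧
       st'.1.get? u = some tarr ∧ pvLeD st.1 st'.1 ∧
       (∀ p ∈ L, tarr ≤ p.2 → ∃ bw, st'.1.get? p.1 = some bw ∧ bw ≤ p.2) ∧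
       st'.2.length + pvMu N T st'.1 ≤ st.2.length + pvMu N T st.1) := by
  induction L with
  | nil =>
    intro st h1 h2 h3 h4 hgu
    exact ⟨h1, h2, h3, h4, hgu, pvLeD_refl st.1, by simp, le_refl _⟩
  | cons p L ih =>
    intro st h1 h2 h3 h4 hgu
    have hor := hL p (List.mem_cons_self ..)
    have hL' := fun x hx => hL x (List.mem_cons_of_mem _ hx)
    have hLN' := fun x hx => hLN x (List.mem_cons_of_mem _ hx)
    have hLT' := fun x hx => hLT x (List.mem_cons_of_mem _ hx)
    rw [List.foldl_cons]
    rcases pvDijkStep_split tarr st p with ⟨hc, heq⟩ | ⟨hc, ⟨bv, hbv, hble⟩, heq⟩ |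
        ⟨hc, himp, heq⟩
    · -- time-infeasible edge: nothing changes, head obligation vacuous
      rw [heq]
      obtain ⟨g1, g2, g3, g4, g5, g6, g7, g8⟩ := ih hL' hLN' hLT' st h1 h2 h3 h4 hgu
      refine ⟨g1, g2, g3, g4, g5, g6, ?_, g8⟩
      intro q hq hle
      rcases List.mem_cons.mp hq with rfl | hq
      · exact absurd hle hc
      · exact g7 q hq hle
    · -- already at least as good: nothing changes, transport the head bound
      rw [heq]
      obtain ⟨g1, g2, g3, g4, g5, g6, g7, g8⟩ := ih hL' hLN' hLT' st h1 h2 h3 h4 hgu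
      refine ⟨g1, g2, g3, g4, g5, g6, ?_, g8⟩
      intro q hq hle
      rcases List.mem_cons.mp hq with rfl | hq
      · obtain ⟨bw, hbw, hbwle⟩ := g6 q.1 bv hbv
        exact ⟨bw, hbw, le_trans hbwle hble⟩
      · exact g7 q hq hle
    · -- improvement: insert p.1 ↦ p.2 and push (p.2, p.1)
      rw [heq]
      have harr : pvTArr edges s p.1 p.2 := pvTArr.step hu hor hc
      have hp1u : p.1 ≠ u := by
        intro hpe
        rw [hpe] at himp
        rcases himp with h | ⟨bv, hbv, hlt⟩
        · rw [hgu] at h; cases h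
        · rw [hgu] at hbv; cases hbv; omega
      have k1 : ∀ v t, (st.1.insert p.1 p.2).get? v = some t → pvTArr edges s v t := by
        intro v t hv
        by_cases hvp : v = p.1
        · subst hvp
          rw [PySem.Dict.get?_insert_self] at hv
          cases hv; exact harr
        · rw [PySem.Dict.get?_insert_of_ne st.1 p.2 hvp] at hv
          exact h1 v t hv
      have k2 : ∃ b0, (st.1.insert p.1 p.2).get? s = some b0 ∧ b0 ≤ 0 := by
        obtain ⟨b0, hb0, hb0le⟩ := h2
        by_cases hsp : s = p.1
        · subst hsp
          refine ⟨p.2, PySem.Dict.get?_insert_self _ _ _, ?_⟩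
          rcases himp with h | ⟨bv, hbv, hlt⟩
          · rw [hb0] at h; cases h
          · rw [hb0] at hbv; cases hbv; omega
        · exact ⟨b0, by rw [PySem.Dict.get?_insert_of_ne st.1 p.2 hsp]; exact hb0, hb0le⟩
      have kle : pvLeD st.1 (st.1.insert p.1 p.2) := by
        intro v t hv
        by_cases hvp : v = p.1
        · subst hvp
          rcases himp with h | ⟨bv, hbv, hlt⟩
          · rw [hv] at h; cases h
          · rw [hv] at hbv; cases hbv
            exact ⟨p.2, PySem.Dict.get?_insert_self _ _ _, le_of_lt hlt⟩
        · exact ⟨t, by rw [PySem.Dict.get?_insert_of_ne st.1 p.2 hvp]; exact hv, le_refl t⟩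
      have k3 : ∀ e ∈ st.2 ++ [(p.2, p.1)],
          ∃ bv, (st.1.insert p.1 p.2).get? e.2 = some bv ∧ bv ≤ e.1 := by
        intro e he
        rcases List.mem_append.mp he with he | he
        · obtain ⟨bv', hbv', hble'⟩ := h3 e he
          obtain ⟨bw, hbw, hbwle⟩ := kle e.2 bv' hbv'
          exact ⟨bw, hbw, le_trans hbwle hble'⟩
        · rw [List.mem_singleton] at he
          subst he
          exact ⟨p.2, PySem.Dict.get?_insert_self _ _ _, le_refl _⟩
      have k4 : ∀ v bv, (st.1.insert p.1 p.2).get? v = some bv → v ≠ u →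
          (bv, v) ∈ st.2 ++ [(p.2, p.1)] ∨ pvStable edges (st.1.insert p.1 p.2) v bv := by
        intro v bv hv hvu
        by_cases hvp : v = p.1
        · subst hvp
          rw [PySem.Dict.get?_insert_self] at hv
          cases hv
          exact Or.inl (List.mem_append.mpr (Or.inr (List.mem_singleton.mpr rfl)))
        · rw [PySem.Dict.get?_insert_of_ne st.1 p.2 hvp] at hv
          rcases h4 v bv hv hvu with hmem | hst
          · exact Or.inl (List.mem_append.mpr (Or.inl hmem))
          · exact Or.inr (pvStable_mono kle hst)
      have kgu : (st.1.insert p.1 p.2).get? u = some tarr := by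
        rw [PySem.Dict.get?_insert_of_ne st.1 p.2 (fun h => hp1u h.symm)]
        exact hgu
      have kmu : (st.2 ++ [(p.2, p.1)]).length + pvMu N T (st.1.insert p.1 p.2) ≤
          st.2.length + pvMu N T st.1 := by
        have hlt := pvMu_insert_lt (hLN p (List.mem_cons_self ..))
          (hLT p (List.mem_cons_self ..)) himp
        simp only [List.length_append, List.length_singleton]
        omega
      obtain ⟨g1, g2, g3, g4, g5, g6, g7, g8⟩ :=
        ih hL' hLN' hLT' (st.1.insert p.1 p.2, st.2 ++ [(p.2, p.1)]) k1 k2 k3 k4 kgu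
      refine ⟨g1, g2, g3, g4, g5, pvLeD_trans kle g6, ?_, le_trans g8 kmu⟩
      intro q hq hle
      rcases List.mem_cons.mp hq with rfl | hq
      · obtain ⟨bw, hbw, hbwle⟩ := g6 q.1 q.2 (PySem.Dict.get?_insert_self _ _ _)
        exact ⟨bw, hbw, hbwle⟩
      · exact g7 q hq hle

theorem pvDijkLoop_good (edges : List (Int × Int × Int)) (s : Int) (N T : List Int)
    (hcl : ∀ a b t, (a, b, t) ∈ edges → a ∈ N ∧ b ∈ N ∧ t ∈ T) :
    ∀ (fuel : Nat) (best : PySem.Dict Int Int) (queue : List (Int × Int)),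
      pvInvA edges s best queue →
      queue.length + pvMu N T best < fuel →
      pvGood edges s (pvDijkLoop (pvBuildAdj edges) fuel best queue) := by
  intro fuel
  induction fuel with
  | zero => intro best queue _ h; omega
  | succ fuel ih =>
    intro best queue hinv hmu
    obtain ⟨h1, h2, h3, h4⟩ := hinv
    rw [pvDijkLoop]
    rcases hpop : pvPop queue with _ | ⟨⟨tarr, u⟩, queue'⟩
    · -- queue empty: the map is stable, hence good
      refine ⟨h1, h2, ?_⟩
      intro v bv hv
      rcases h4 v bv hv with hmem | hst
      · rw [(pvPop_none_iff queue).mp hpop] at hmem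
        cases hmem
      · exact hst
    · obtain ⟨bu', hgu, hbule⟩ := h3 (tarr, u) (pvPop_mem hpop)
      simp only at hgu hbule
      have hqlen := pvPop_length hpop
      by_cases hskip : bu' < tarr
      · -- stale entry: skip
        simp only [hgu, hskip, decide_true, if_true]
        apply ih
        · refine ⟨h1, h2, ?_, ?_⟩
          · intro e he
            exact h3 e (pvPop_sub hpop e he)
          · intro v bv hv
            rcases h4 v bv hv with hmem | hst
            · rcases pvPop_mem_or hpop _ hmem with heq | hmem'
              · exfalso
                have hv' : v = u := congrArg Prod.snd heq
                have hb' : bv = tarr := congrArg Prod.fst heq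
                subst hv' 
                rw [hgu] at hv
                cases hv
                omega
              · exact Or.inl hmem'
            · exact Or.inr hst
        · omega
      · -- live entry: bu' = tarr, relax all of u's adjacency
        have htarr : bu' = tarr := by omega
        subst htarr
        simp only [hgu, hskip, decide_false]
        have hu : pvTArr edges s u bu' := h1 u bu' hgu
        have hbundle := pvDijkFold edges s bu' u N T ((pvBuildAdj edges).getD u [])
          (fun p hp => (pvMem_adj edges u p).mp hp)
          (fun p hp => by
            rcases (pvMem_adj edges u p).mp hp with he | he
            · exact (hcl _ _ _ he).2.1
            · exact (hcl _ _ _ he).1)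
          (fun p hp => by
            rcases (pvMem_adj edges u p).mp hp with he | he
            · exact (hcl _ _ _ he).2.2
            · exact (hcl _ _ _ he).2.2)
          hu (best, queue') h1 h2
          (fun e he => h3 e (pvPop_sub hpop e he))
          (fun v bv hv hvu => by
            rcases h4 v bv hv with hmem | hst
            · rcases pvPop_mem_or hpop _ hmem with heq | hmem'
              · exact absurd (congrArg Prod.snd heq) hvu
              · exact Or.inl hmem'
            · exact Or.inr hst)
          hgu
        obtain ⟨g1, g2, g3, g4, g5, g6, g7, g8⟩ := hbundle
        apply ih
        · refine ⟨g1, g2, g3, ?_⟩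
          intro v bv hv
          by_cases hvu : v = u
          · subst hvu
            rw [g5] at hv
            cases hv
            right
            intro w te hor hle
            exact g7 (w, te) ((pvMem_adj edges v (w, te)).mpr hor) hle
          · exact g4 v bv hv hvu
        · simp only at g8
          omega

theorem pvA_good (edges : List (Int × Int × Int)) (s : Int) :
    pvGood edges s
      (pvDijkLoop (pvBuildAdj edges) (pvFuel edges)
        (PySem.Dict.empty.insert s 0) [(0, s)]) := by
  apply pvDijkLoop_good edges s (pvNodes edges) (pvTimes edges)
    (fun a b t h => ⟨pvMem_nodes_left h, pvMem_nodes_right h, pvMem_times h⟩)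
  · refine ⟨?_, ⟨0, PySem.Dict.get?_insert_self _ _ _, le_refl 0⟩, ?_, ?_⟩
    · intro v t hv
      by_cases hvs : v = s
      · subst hvs
        rw [PySem.Dict.get?_insert_self] at hv
        cases hv
        exact pvTArr.src
      · rw [PySem.Dict.get?_insert_of_ne _ _ hvs, PySem.Dict.get?_empty] at hv
        cases hv
    · intro e he
      rw [List.mem_singleton] at he
      subst he
      exact ⟨0, PySem.Dict.get?_insert_self _ _ _, le_refl 0⟩
    · intro v bv hv
      by_cases hvs : v = s
      · subst hvs
        rw [PySem.Dict.get?_insert_self] at hv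
        cases hv
        exact Or.inl (List.mem_singleton.mpr rfl)
      · rw [PySem.Dict.get?_insert_of_ne _ _ hvs, PySem.Dict.get?_empty] at hv
        cases hv
  · have := pvMu_le_bound (pvNodes edges) (pvTimes edges) (PySem.Dict.empty.insert s 0)
    unfold pvFuel
    simp only [List.length_singleton]
    omega

-- ===== B-side =====

def pvFire (best : PySem.Dict Int Int) (u v t : Int) : Prop :=
  (∃ bu, best.get? u = some bu ∧ bu ≤ t) ∧
  (best.get? v = none ∨ ∃ bv, best.get? v = some bv ∧ t < bv)

theorem pvRelax_split (u v t : Int) (st : PySem.Dict Int Int × Bool) :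
    (pvRelax u v t st = st ∧ ¬ pvFire st.1 u v t) ∨
    (pvFire st.1 u v t ∧ pvRelax u v t st = (st.1.insert v t, true)) := by
  rcases hu : st.1.get? u with _ | bu
  · left
    refine ⟨by simp [pvRelax, hu], ?_⟩
    rintro ⟨⟨bu, hbu, _⟩, _⟩
    simp [hu] at hbu
  · by_cases hbu : bu ≤ t
    · rcases hv : st.1.get? v with _ | bv
      · right
        exact ⟨⟨⟨bu, hu, hbu⟩, Or.inl hv⟩, by simp [pvRelax, hu, hv, hbu]⟩
      · by_cases hbv : t < bv
        · right
          exact ⟨⟨⟨bu, hu, hbu⟩, Or.inr ⟨bv, hv, hbv⟩⟩, by simp [pvRelax, hu, hv, hbu, hbv]⟩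
        · left
          refine ⟨by simp [pvRelax, hu, hv, hbu, hbv], ?_⟩
          rintro ⟨_, hfire2⟩
          rcases hfire2 with h | ⟨bv', hbv', hlt⟩
          · simp [hv] at h
          · rw [hv] at hbv'; cases hbv'; exact hbv hlt
    · left
      refine ⟨by simp [pvRelax, hu, hbu], ?_⟩
      rintro ⟨⟨bu', hbu', hle⟩, _⟩
      rw [hu] at hbu'; cases hbu'; exact hbu hle

theorem pvRelax_sound {edges : List (Int × Int × Int)} {s u v t : Int}
    (hor : (u, v, t) ∈ edges ∨ (v, u, t) ∈ edges)
    (st : PySem.Dict Int Int × Bool)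
    (h1 : ∀ x tx, st.1.get? x = some tx → pvTArr edges s x tx)
    (h2 : ∃ b0, st.1.get? s = some b0 ∧ b0 ≤ 0) :
    (∀ x tx, (pvRelax u v t st).1.get? x = some tx → pvTArr edges s x tx) ∧
    (∃ b0, (pvRelax u v t st).1.get? s = some b0 ∧ b0 ≤ 0) := by
  rcases pvRelax_split u v t st with ⟨heq, _⟩ | ⟨⟨⟨bu, hbu, hbut⟩, himp⟩, heq⟩
  · rw [heq]; exact ⟨h1, h2⟩
  · rw [heq]
    have harr : pvTArr edges s v t := pvTArr.step (h1 u bu hbu) hor hbut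
    constructor
    · intro x tx hx
      by_cases hxv : x = v
      · subst hxv
        rw [PySem.Dict.get?_insert_self] at hx
        cases hx; exact harr
      · rw [PySem.Dict.get?_insert_of_ne st.1 t hxv] at hx
        exact h1 x tx hx
    · obtain ⟨b0, hb0, hb0le⟩ := h2
      by_cases hsv : s = v
      · subst hsv
        refine ⟨t, PySem.Dict.get?_insert_self st.1 s t, ?_⟩
        rcases himp with h | ⟨bv, hbv, hlt⟩
        · rw [hb0] at h; cases h
        · rw [hb0] at hbv; cases hbv; exact le_of_lt (lt_of_lt_of_le hlt hb0le)
      · exact ⟨b0, by rw [PySem.Dict.get?_insert_of_ne st.1 t hsv]; exact hb0, hb0le⟩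

-- shape of one relaxation: unchanged, or flagged with a strictly smaller measure
theorem pvRelax_shape {N T : List Int} {v t : Int} (u : Int) (hv : v ∈ N) (ht : t ∈ T)
    (st : PySem.Dict Int Int × Bool) :
    pvRelax u v t st = st ∨
    ((pvRelax u v t st).2 = true ∧ pvMu N T (pvRelax u v t st).1 < pvMu N T st.1) := by
  rcases pvRelax_split u v t st with ⟨heq, _⟩ | ⟨⟨_, himp⟩, heq⟩
  · exact Or.inl heq
  · right
    rw [heq]
    exact ⟨rfl, pvMu_insert_lt hv ht (by
      rcases himp with h | ⟨bv, hbv, hlt⟩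
      · exact Or.inl h
      · exact Or.inr ⟨bv, hbv, hlt⟩)⟩

theorem pvSweepStep_shape {edges : List (Int × Int × Int)} {N T : List Int}
    (hcl : ∀ a b t, (a, b, t) ∈ edges → a ∈ N ∧ b ∈ N ∧ t ∈ T)
    {e : Int × Int × Int} (he : e ∈ edges) (st : PySem.Dict Int Int × Bool) :
    (pvRelax e.2.1 e.1 e.2.2 (pvRelax e.1 e.2.1 e.2.2 st)) = st ∨
    (((pvRelax e.2.1 e.1 e.2.2 (pvRelax e.1 e.2.1 e.2.2 st))).2 = true ∧
      pvMu N T ((pvRelax e.2.1 e.1 e.2.2 (pvRelax e.1 e.2.1 e.2.2 st))).1 < pvMu N T st.1) := by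
  obtain ⟨a, b, t⟩ := e
  obtain ⟨haN, hbN, htT⟩ := hcl a b t he
  rcases pvRelax_shape (N := N) (T := T) a hbN htT st with h1 | ⟨h1c, h1m⟩
  · rw [h1]
    exact pvRelax_shape b haN htT st
  · rcases pvRelax_shape (N := N) (T := T) b haN htT (pvRelax a b t st) with h2 | ⟨h2c, h2m⟩
    · rw [h2]; exact Or.inr ⟨h1c, h1m⟩
    · refine Or.inr ⟨h2c, lt_trans h2m h1m⟩

-- ch never goes back to false along a sweep
theorem pvRelax_ch (u v t : Int) (st : PySem.Dict Int Int × Bool) (h : st.2 = true) :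
    (pvRelax u v t st).2 = true := by
  rcases pvRelax_split u v t st with ⟨heq, _⟩ | ⟨_, heq⟩
  · rw [heq]; exact h
  · rw [heq]

theorem pvSweepFold_ch (L : List (Int × Int × Int)) :
    ∀ st : PySem.Dict Int Int × Bool, st.2 = true →
      (L.foldl (fun st e => pvRelax e.2.1 e.1 e.2.2 (pvRelax e.1 e.2.1 e.2.2 st)) st).2 = true := by
  induction L with
  | nil => intro st h; exact h
  | cons e L ih =>
    intro st h
    exact ih _ (pvRelax_ch _ _ _ _ (pvRelax_ch _ _ _ _ h))

theorem pvSweepFold_shape {edges : List (Int × Int × Int)} {N T : List Int}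
    (hcl : ∀ a b t, (a, b, t) ∈ edges → a ∈ N ∧ b ∈ N ∧ t ∈ T) :
    ∀ (L : List (Int × Int × Int)), (∀ e ∈ L, e ∈ edges) →
    ∀ st : PySem.Dict Int Int × Bool,
      (L.foldl (fun st e => pvRelax e.2.1 e.1 e.2.2 (pvRelax e.1 e.2.1 e.2.2 st)) st) = st ∨
      ((L.foldl (fun st e => pvRelax e.2.1 e.1 e.2.2 (pvRelax e.1 e.2.1 e.2.2 st)) st).2 = true ∧
        pvMu N T (L.foldl (fun st e => pvRelax e.2.1 e.1 e.2.2 (pvRelax e.1 e.2.1 e.2.2 st)) st).1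
          < pvMu N T st.1) := by
  intro L
  induction L with
  | nil => intro _ st; exact Or.inl rfl
  | cons e L ih =>
    intro hL st
    rw [List.foldl_cons]
    rcases pvSweepStep_shape hcl (hL e (List.mem_cons_self ..)) st with h1 | ⟨h1c, h1m⟩
    · rw [h1]
      exact ih (fun x hx => hL x (List.mem_cons_of_mem _ hx)) st
    · rcases ih (fun x hx => hL x (List.mem_cons_of_mem _ hx))
        (pvRelax e.2.1 e.1 e.2.2 (pvRelax e.1 e.2.1 e.2.2 st)) with h2 | ⟨h2c, h2m⟩
      · rw [h2]; exact Or.inr ⟨h1c, h1m⟩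
      · exact Or.inr ⟨h2c, lt_trans h2m h1m⟩

theorem pvSweepFold_fix (L : List (Int × Int × Int)) :
    ∀ st : PySem.Dict Int Int × Bool,
      (L.foldl (fun st e => pvRelax e.2.1 e.1 e.2.2 (pvRelax e.1 e.2.1 e.2.2 st)) st).2 = false →
      (L.foldl (fun st e => pvRelax e.2.1 e.1 e.2.2 (pvRelax e.1 e.2.1 e.2.2 st)) st) = st ∧
      ∀ e ∈ L, ¬ pvFire st.1 e.1 e.2.1 e.2.2 ∧ ¬ pvFire st.1 e.2.1 e.1 e.2.2 := by
  induction L with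
  | nil => intro st _; exact ⟨rfl, by simp⟩
  | cons e L ih =>
    intro st h
    rw [List.foldl_cons] at h ⊢
    -- the step's flag must be false, else the fold's flag would be true
    have hstep2 : (pvRelax e.2.1 e.1 e.2.2 (pvRelax e.1 e.2.1 e.2.2 st)).2 = false := by
      by_contra hc
      rw [pvSweepFold_ch L _ (Bool.of_not_eq_false hc)] at h
      cases h
    have hr1 : (pvRelax e.1 e.2.1 e.2.2 st).2 = false := by
      by_contra hc
      rw [pvRelax_ch _ _ _ _ (Bool.of_not_eq_false hc)] at hstep2
      cases hstep2
    have hfix2 := pvRelax_split e.2.1 e.1 e.2.2 (pvRelax e.1 e.2.1 e.2.2 st)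
    rcases hfix2 with ⟨heq2, hnf2⟩ | ⟨_, heq2⟩
    · rcases pvRelax_split e.1 e.2.1 e.2.2 st with ⟨heq1, hnf1⟩ | ⟨_, heq1⟩
      · rw [heq2, heq1] at h ⊢
        obtain ⟨hfold, hall⟩ := ih st h
        refine ⟨hfold, ?_⟩
        intro x hx
        rcases List.mem_cons.mp hx with rfl | hx
        · rw [heq1] at hnf2
          exact ⟨hnf1, hnf2⟩
        · exact hall x hx
      · rw [heq1] at hr1; cases hr1
    · rw [heq2] at hstep2; cases hstep2

theorem pvSweep_sound' (edges : List (Int × Int × Int)) (s : Int) :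
    ∀ (L : List (Int × Int × Int)), (∀ e ∈ L, e ∈ edges) →
    ∀ st : PySem.Dict Int Int × Bool,
      (∀ x tx, st.1.get? x = some tx → pvTArr edges s x tx) →
      (∃ b0, st.1.get? s = some b0 ∧ b0 ≤ 0) →
      (∀ x tx, (L.foldl (fun st e => pvRelax e.2.1 e.1 e.2.2 (pvRelax e.1 e.2.1 e.2.2 st)) st).1.get? x = some tx → pvTArr edges s x tx) ∧
      (∃ b0, (L.foldl (fun st e => pvRelax e.2.1 e.1 e.2.2 (pvRelax e.1 e.2.1 e.2.2 st)) st).1.get? s = some b0 ∧ b0 ≤ 0) := by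
  intro L
  induction L with
  | nil => intro _ st h1 h2; exact ⟨h1, h2⟩
  | cons e L ih =>
    intro hL st h1 h2
    rw [List.foldl_cons]
    have he := hL e (List.mem_cons_self ..)
    obtain ⟨a, b, t⟩ := e
    have s1 := pvRelax_sound (edges := edges) (s := s) (Or.inl he) st h1 h2
    have s2 := pvRelax_sound (edges := edges) (s := s) (Or.inr he) _ s1.1 s1.2
    exact ih (fun x hx => hL x (List.mem_cons_of_mem _ hx)) _ s2.1 s2.2

theorem pvSweep_sound (edges : List (Int × Int × Int)) (s : Int)
    (best : PySem.Dict Int Int)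
    (h1 : ∀ v t, best.get? v = some t → pvTArr edges s v t)
    (h2 : ∃ b0, best.get? s = some b0 ∧ b0 ≤ 0) :
    (∀ v t, (pvSweep edges best).1.get? v = some t → pvTArr edges s v t) ∧
    (∃ b0, (pvSweep edges best).1.get? s = some b0 ∧ b0 ≤ 0) :=
  pvSweep_sound' edges s edges (fun _ hx => hx) (best, false) h1 h2

theorem pvSweep_mu (edges : List (Int × Int × Int)) (N T : List Int)
    (hcl : ∀ a b t, (a, b, t) ∈ edges → a ∈ N ∧ b ∈ N ∧ t ∈ T)
    (best : PySem.Dict Int Int) :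
    pvMu N T (pvSweep edges best).1 ≤ pvMu N T best ∧
    ((pvSweep edges best).2 = true → pvMu N T (pvSweep edges best).1 < pvMu N T best) := by
  rcases pvSweepFold_shape hcl edges (fun _ hx => hx) (best, false) with h | ⟨hc, hm⟩
  · unfold pvSweep
    rw [h]
    exact ⟨le_refl _, by intro hx; cases hx⟩
  · exact ⟨le_of_lt hm, fun _ => hm⟩

theorem pvSweep_fix (edges : List (Int × Int × Int)) (best : PySem.Dict Int Int)
    (h : (pvSweep edges best).2 = false) :
    (pvSweep edges best).1 = best ∧
    (∀ v bv, best.get? v = some bv → pvStable edges best v bv) := by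
  obtain ⟨hfold, hall⟩ := pvSweepFold_fix edges (best, false) h
  constructor
  · unfold pvSweep; rw [hfold]
  · intro v bv hv w te hor hle
    have hnofire : ¬ pvFire best v w te := by
      rcases hor with he | he
      · exact (hall (v, w, te) he).1
      · exact (hall (w, v, te) he).2
    rcases hw : best.get? w with _ | bw
    · exact absurd ⟨⟨bv, hv, hle⟩, Or.inl hw⟩ hnofire
    · by_cases hlt : te < bw
      · exact absurd ⟨⟨bv, hv, hle⟩, Or.inr ⟨bw, hw, hlt⟩⟩ hnofire
      · exact ⟨bw, rfl, by omega⟩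

theorem pvBLoop_good (edges : List (Int × Int × Int)) (s : Int) (N T : List Int)
    (hcl : ∀ a b t, (a, b, t) ∈ edges → a ∈ N ∧ b ∈ N ∧ t ∈ T) :
    ∀ (f : Nat) (best : PySem.Dict Int Int),
      (∀ v t, best.get? v = some t → pvTArr edges s v t) →
      (∃ b0, best.get? s = some b0 ∧ b0 ≤ 0) →
      pvMu N T best < f →
      pvGood edges s (pvBLoop edges f best) := by
  intro f
  induction f with
  | zero => intro best _ _ h; omega
  | succ f ih =>
    intro best h1 h2 hmu
    show pvGood edges s (pvBLoop edges (f + 1) best)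
    rw [pvBLoop]
    by_cases hch : (pvSweep edges best).2 = true
    · simp only [hch, if_true]
      obtain ⟨h1', h2'⟩ := pvSweep_sound edges s best h1 h2
      have hlt := (pvSweep_mu edges N T hcl best).2 hch
      exact ih _ h1' h2' (by omega)
    · simp only [Bool.not_eq_true] at hch
      simp only [hch, Bool.false_eq_true, if_false]
      obtain ⟨heq, hstab⟩ := pvSweep_fix edges best hch
      rw [heq]
      exact ⟨h1, h2, hstab⟩

theorem pvB_good (edges : List (Int × Int × Int)) (s : Int) :
    pvGood edges s (pvBLoop edges (pvFuel edges) (PySem.Dict.empty.insert s 0)) := by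
  apply pvBLoop_good edges s (pvNodes edges) (pvTimes edges)
    (fun a b t h => ⟨pvMem_nodes_left h, pvMem_nodes_right h, pvMem_times h⟩)
  · intro v t hv
    by_cases hvs : v = s
    · subst hvs
      rw [PySem.Dict.get?_insert_self] at hv
      cases hv
      exact pvTArr.src
    · rw [PySem.Dict.get?_insert_of_ne _ _ hvs, PySem.Dict.get?_empty] at hv
      cases hv
  · exact ⟨0, PySem.Dict.get?_insert_self _ _ _, le_refl 0⟩
  · have := pvMu_le_bound (pvNodes edges) (pvTimes edges) (PySem.Dict.empty.insert s 0)
    unfold pvFuel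
    omega

-- ===== assembly =====

theorem pvPerSource (edges : List (Int × Int × Int)) (s d : Int) :
    PySem.Set.contains (pvTemporalReachableFrom s (pvBuildAdj edges) (pvFuel edges)) d
      = (pvBLoop edges (pvFuel edges) (PySem.Dict.empty.insert s 0)).contains d := by
  rw [Bool.eq_iff_iff]
  unfold pvTemporalReachableFrom
  rw [PySem.Set.contains_iff, PySem.Set.mem_ofList, ← PySem.Dict.contains_iff_mem_keys,
    PySem.Dict.contains_eq_isSome_get?, PySem.Dict.contains_eq_isSome_get?]
  rw [pvGood_keys (pvA_good edges s) d, pvGood_keys (pvB_good edges s) d]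


-- ===== VERDICT (by name: the statement is the Claim_ definition above) =====
theorem all_pairs_reach_spec : Claim_equal_all_pairs_reach := by
  intro k edges _
  show all_pairs_reach k edges = all_pairs_reach_alt k edges
  simp only [all_pairs_reach, all_pairs_reach_alt]
  congr 1
  congr 1
  have h : (fun (reach : PySem.Dict (Int × Int) Bool) (s : Int) =>
      List.foldl (fun (reach : PySem.Dict (Int × Int) Bool) (d : Int) =>
        reach.insert (s, d)
          ((pvTemporalReachableFrom s (pvBuildAdj edges) (pvFuel edges)).contains d))
        reach (PySem.List.pyRange 0 (2 * k)))
      = (fun (reach : PySem.Dict (Int × Int) Bool) (s : Int) =>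
      List.foldl (fun (reach : PySem.Dict (Int × Int) Bool) (d : Int) =>
        reach.insert (s, d)
          ((pvBLoop edges (pvFuel edges) (PySem.Dict.empty.insert s 0)).contains d))
        reach (PySem.List.pyRange 0 (2 * k))) := by
    funext reach s
    have h2 : (fun (reach : PySem.Dict (Int × Int) Bool) (d : Int) =>
        reach.insert (s, d)
          ((pvTemporalReachableFrom s (pvBuildAdj edges) (pvFuel edges)).contains d))
        = (fun (reach : PySem.Dict (Int × Int) Bool) (d : Int) =>
        reach.insert (s, d)
          ((pvBLoop edges (pvFuel edges) (PySem.Dict.empty.insert s 0)).contains d)) := by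
      funext reach d
      rw [pvPerSource]
    rw [h2]
  rw [h]
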